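-- pv_equiv track=rewrite | github.com/luyao-cv/RVC | eb4_svc_debug.gradio.py | cut_duration
-- ===== SOURCE A (Python) =====
-- def cut_duration(lyrics, durations):
--     durations_lst = []
--     idx = 0
--     rest = []
--     for i in range(len(lyrics)):
--         len_lyric = len(lyrics[i])
--         if i == 0:
--             durations_lst.append(durations[idx:idx + len_lyric])
--             rest.append(durations[idx + len_lyric])
--         else:
--             if i == len(lyrics) - 1:
--                 durations_lst.append(durations[idx:idx + len_lyric])
--             else:
--                 durations_lst.append(durations[idx:idx + len_lyric])
--                 rest.append(durations[idx + len_lyric])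
--         idx += len_lyric + 1
--     return durations_lst, rest
-- ===== SOURCE B (Python) =====
-- def cut_duration(lyrics, durations):
--     def go(ls, rem, first):
--         if not ls:
--             return [], []
--         k = len(ls[0])
--         tail_groups, tail_rest = go(ls[1:], rem[k + 1:], False)
--         here = [rem[k]] if (first or ls[1:]) else []
--         return [rem[:k]] + tail_groups, here + tail_rest
--     return go(lyrics, durations, True)
-- ===== Notes on version B (the rewrite author's own statement) =====
-- stated objective: alternative
-- what changed: Replaces the index-arithmetic loop with a running offset and slices of the full list by a structural recursion that consumes the durations list with take/drop (no offset variable, no enumerate), keeping the exact rest predicate (first or not-last).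
import Mathlib
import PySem

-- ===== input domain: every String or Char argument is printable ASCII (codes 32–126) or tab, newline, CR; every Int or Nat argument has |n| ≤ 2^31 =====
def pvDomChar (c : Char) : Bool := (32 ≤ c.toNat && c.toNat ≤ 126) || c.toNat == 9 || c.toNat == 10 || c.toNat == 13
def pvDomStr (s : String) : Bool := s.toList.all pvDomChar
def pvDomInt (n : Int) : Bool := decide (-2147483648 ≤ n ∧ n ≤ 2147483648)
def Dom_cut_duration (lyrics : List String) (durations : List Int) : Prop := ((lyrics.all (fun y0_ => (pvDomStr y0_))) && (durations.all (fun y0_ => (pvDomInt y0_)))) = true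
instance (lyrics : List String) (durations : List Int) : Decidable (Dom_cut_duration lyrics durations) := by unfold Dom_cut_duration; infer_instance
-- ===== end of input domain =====

-- ===== PORT A =====
-- Faithful transliteration of A's for-loop: fold over enumerate(lyrics) carrying
-- (durations_lst, idx, rest); durations[idx+len] is pyGetD (in range under Pre_,
-- which excludes exactly the inputs where Python raises IndexError).
def cutA_step (durations : List Int) (n : Int)
    (st : List (List Int) × Int × List Int) (p : Int × String) :
    List (List Int) × Int × List Int :=
  let dl := st.1
  let idx := st.2.1
  let rest := st.2.2
  let i := p.1
  let len_lyric : Int := PySem.Str.len p.2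
  if i = 0 then
    (dl ++ [PySem.List.slice durations (some idx) (some (idx + len_lyric))],
     idx + len_lyric + 1,
     rest ++ [PySem.List.pyGetD durations (idx + len_lyric) 0])
  else if i = n - 1 then
    (dl ++ [PySem.List.slice durations (some idx) (some (idx + len_lyric))],
     idx + len_lyric + 1,
     rest)
  else
    (dl ++ [PySem.List.slice durations (some idx) (some (idx + len_lyric))],
     idx + len_lyric + 1,
     rest ++ [PySem.List.pyGetD durations (idx + len_lyric) 0])

def cut_duration (lyrics : List String) (durations : List Int) : List (List Int) × List Int :=
  let n : Int := lyrics.length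
  let r := (PySem.List.enumerate lyrics 0).foldl (cutA_step durations n) ([], 0, [])
  (r.1, r.2.2)

-- ===== PORT B =====
-- B: structural recursion consuming `rem` by take/drop; `first or tail nonempty`
-- is A's rest predicate (i==0 or i != last).
def cutB_go (ls : List String) (rem : List Int) (first : Bool) : List (List Int) × List Int :=
  match ls with
  | [] => ([], [])
  | l :: tl =>
    let k : Int := PySem.Str.len l
    let t := cutB_go tl (PySem.List.slice rem (some (k + 1)) none) false
    let here : List Int := if first || !tl.isEmpty then [PySem.List.pyGetD rem k 0] else []
    (PySem.List.slice rem none (some k) :: t.1, here ++ t.2)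

def cut_duration_alt (lyrics : List String) (durations : List Int) : List (List Int) × List Int :=
  cutB_go lyrics durations true

-- ===== PRECONDITION & SPEC =====
-- Pre_ excludes exactly the inputs on which Python A raises IndexError reading the
-- separator durations[idx+len] (durations too short); B raises there too.
def Pre_cut_duration (lyrics : List String) (durations : List Int) : Prop :=
  lyrics.length = 0 ∨
    ((lyrics.take (max (lyrics.length - 1) 1)).map (fun s => PySem.Str.len s + 1)).sum
      ≤ (durations.length : Int)
instance (lyrics : List String) (durations : List Int) : Decidable (Pre_cut_duration lyrics durations) := by
  unfold Pre_cut_duration; infer_instance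
def pvWitness_cut_duration : List String × List Int := (["ab", "c"], [1, 2, 3, 4])

-- ===== PRECONDITION & SPEC =====
def Spec_cut_duration (lyrics : List String) (durations : List Int) (out : List (List Int) × List Int) : Prop := out = cut_duration_alt lyrics durations
instance (lyrics : List String) (durations : List Int) (out : List (List Int) × List Int) : Decidable (Spec_cut_duration lyrics durations out) := by unfold Spec_cut_duration; infer_instance

-- ===== CLAIM (what is proved, stated in full; the proofs are below) =====
def Claim_equal_cut_duration : Prop := ∀ (lyrics : List String) (durations : List Int), Dom_cut_duration lyrics durations → Pre_cut_duration lyrics durations → Spec_cut_duration lyrics durations (cut_duration lyrics durations)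

-- ===== LEMMAS AND PROOFS =====

lemma getD_drop_add (xs : List Int) (i j : Nat) (d : Int) :
    (xs.drop i).getD j d = xs.getD (i + j) d := by
  simp [List.getD_eq_getElem?_getD, List.getElem?_drop]

-- Loop invariant for the non-first part of A's fold: starting at enumerate index s ≥ 1
-- with offset idx, the fold appends exactly what cutB_go produces on durations.drop idx.
lemma loop_suffix (durations : List Int) (n : Int) (ls : List String) :
    ∀ (s : Int) (idx : Nat) (dl : List (List Int)) (rest : List Int),
      1 ≤ s → s + ls.length = n →
      ((PySem.List.enumerate ls s).foldl (cutA_step durations n) (dl, (idx : Int), rest)).1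
          = dl ++ (cutB_go ls (durations.drop idx) false).1
        ∧ ((PySem.List.enumerate ls s).foldl (cutA_step durations n) (dl, (idx : Int), rest)).2.2
          = rest ++ (cutB_go ls (durations.drop idx) false).2 := by
  induction ls with
  | nil => intro s idx dl rest hs hn; simp [PySem.List.enumerate_nil, cutB_go]
  | cons l tl ih =>
    intro s idx dl rest hs hn
    rw [PySem.List.enumerate_cons]
    simp only [List.foldl_cons]
    have hk : PySem.Str.len l = (l.length : Int) := by simp [PySem.Str.len_eq]
    have hs0 : s ≠ 0 := by omega
    have hsl : PySem.List.slice durations (some (idx : Int)) (some ((idx : Int) + (l.length : Int)))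
        = (durations.drop idx).take l.length := PySem.List.slice_natCast_add durations idx l.length
    rcases eq_or_ne tl ([] : List String) with htl | htl
    · -- last lyric: no rest entry
      subst htl
      have hlast : s = n - 1 := by simp at hn; omega
      simp only [cutA_step, hk]
      rw [if_neg hs0, if_pos hlast]
      simp only [PySem.List.enumerate_nil, List.foldl_nil]
      simp [cutB_go, hsl, PySem.List.slice_to_natCast]
    · -- middle lyric: rest entry, recurse
      have hmid : s ≠ n - 1 := by
        have : 1 ≤ tl.length := List.length_pos_iff.mpr htl
        simp at hn; omega
      simp only [cutA_step, hk]
      rw [if_neg hs0, if_neg hmid]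
      have hidx : (idx : Int) + (l.length : Int) + 1 = ((idx + l.length + 1 : Nat) : Int) := by
        push_cast; ring
      rw [hidx]
      obtain ⟨h1, h2⟩ := ih (s + 1) (idx + l.length + 1)
        (dl ++ [PySem.List.slice durations (some (idx : Int)) (some ((idx : Int) + (l.length : Int)))])
        (rest ++ [PySem.List.pyGetD durations ((idx : Int) + (l.length : Int)) 0])
        (by omega) (by simp at hn ⊢; omega)
      rw [h1, h2]
      have hdrop : PySem.List.slice (durations.drop idx) (some ((l.length : Int) + 1)) none
          = durations.drop (idx + l.length + 1) := by
        have h : (l.length : Int) + 1 = ((l.length + 1 : Nat) : Int) := by push_cast; ring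
        rw [h, PySem.List.slice_from_natCast, List.drop_drop]
        congr 1
      have hget : PySem.List.pyGetD durations ((idx : Int) + (l.length : Int)) 0
          = PySem.List.pyGetD (durations.drop idx) (l.length : Int) 0 := by
        have h : (idx : Int) + (l.length : Int) = ((idx + l.length : Nat) : Int) := by push_cast; ring
        rw [h, PySem.List.pyGetD_natCast, PySem.List.pyGetD_natCast, getD_drop_add]
      simp [cutB_go, hsl, hdrop, hget, htl]

-- ===== VERDICT (by name: the statement is the Claim_ definition above) =====
theorem cut_duration_spec : Claim_equal_cut_duration := by
  intro lyrics durations _ _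
  unfold Spec_cut_duration cut_duration cut_duration_alt
  cases lyrics with
  | nil => simp [PySem.List.enumerate_nil, cutB_go]
  | cons l tl =>
    rw [PySem.List.enumerate_cons]
    simp only [List.foldl_cons]
    have hk : PySem.Str.len l = (l.length : Int) := by simp [PySem.Str.len_eq]
    simp only [cutA_step, hk]
    rw [if_pos trivial]
    have hsl : PySem.List.slice durations (some (0 : Int)) (some ((0 : Int) + (l.length : Int)))
        = (durations.drop 0).take l.length :=
      PySem.List.slice_natCast_add durations 0 l.length
    have hidx : (0 : Int) + (l.length : Int) + 1 = ((l.length + 1 : Nat) : Int) := by push_cast; ring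
    have hz : (0 : Int) + (l.length : Int) = ((0 + l.length : Nat) : Int) := by push_cast; ring
    rw [hidx]
    have hdr : PySem.List.slice durations (some ((l.length : Int) + 1)) none
        = durations.drop (l.length + 1) := by
      have h : (l.length : Int) + 1 = ((l.length + 1 : Nat) : Int) := by push_cast; ring
      rw [h, PySem.List.slice_from_natCast]
    cases htl : tl with
    | nil =>
      simp only [PySem.List.enumerate_nil, List.foldl_nil]
      simp [cutB_go, hz, PySem.List.pyGetD_natCast, PySem.List.slice_to_natCast]
    | cons m ml =>
      obtain ⟨h1, h2⟩ := loop_suffix durations ((l :: m :: ml).length : Int) (m :: ml) (0 + 1) (l.length + 1)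
        ([] ++ [PySem.List.slice durations (some (0 : Int)) (some ((0 : Int) + (l.length : Int)))])
        ([] ++ [PySem.List.pyGetD durations ((0 : Int) + (l.length : Int)) 0])
        (by omega) (by push_cast [List.length_cons]; ring)
      refine Prod.ext ?_ ?_
      · rw [h1]
        simp [cutB_go, hdr, PySem.List.slice_to_natCast]
      · rw [h2]
        simp [cutB_go, hdr, hz, PySem.List.pyGetD_natCast]
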